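-- pv_equiv track=rewrite | github.com/salvador-dali/algorithms_general | interview_bits/level_1/01_mathematics/02_number_theory/04_sorted-permutation-rank-with-repeats.py | rankperm
-- ===== SOURCE A (Python) =====
-- from collections import Counter
--
-- mod = 1000003
--
-- def rankperm(perm):
--     # http://stackoverflow.com/a/22643546/1090562
--     rank, suffix_perms, n = 1, 1, len(perm)
--     ctr = Counter()
--     for i in range(n):
--         x = perm[((n - 1) - i)]
--         ctr[x] += 1
--
--         inv = pow(ctr[x], mod - 2, mod)
--         for y in ctr:
--             if y < x:
--                 rank = (rank + suffix_perms * ctr[y] * inv) % mod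
--
--         suffix_perms = (suffix_perms * (i + 1) * inv) % mod
--     return rank
-- ===== SOURCE B (Python) =====
-- # Faster than A: sorted suffix list + binary search replaces the per-step scan over all distinct Counter keys.
-- mod = 1000003
--
-- def _bisect_left(s, x):
--     lo, hi = 0, len(s)
--     while lo < hi:
--         m = (lo + hi) // 2
--         if s[m] < x:
--             lo = m + 1
--         else:
--             hi = m
--     return lo
--
-- def _bisect_right(s, x):
--     lo, hi = 0, len(s)
--     while lo < hi:
--         m = (lo + hi) // 2
--         if x < s[m]:
--             hi = m
--         else:
--             lo = m + 1
--     return lo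
--
-- def rankperm(perm):
--     # Sorted suffix list + binary search instead of a Counter with a full key scan:
--     # lo = #elements < x in the suffix, hi - lo + 1 = multiplicity of x including itself.
--     n = len(perm)
--     rank, suffix_perms = 1, 1
--     s = []
--     for i in range(n - 1, -1, -1):
--         x = perm[i]
--         lo = _bisect_left(s, x)
--         hi = _bisect_right(s, x)
--         s.insert(hi, x)
--         inv = pow(hi - lo + 1, mod - 2, mod)
--         rank = (rank + suffix_perms * lo * inv) % mod
--         suffix_perms = (suffix_perms * (n - i) * inv) % mod
--     return rank
-- ===== Notes on version B (the rewrite author's own statement) =====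
-- stated objective: faster
-- what changed: Replaces A's Counter with its per-step scan over all distinct values (summing multiplicities of keys < x) by a sorted suffix list maintained by insertion, where binary search gives both the number of smaller elements and the multiplicity of x.
import Mathlib
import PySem

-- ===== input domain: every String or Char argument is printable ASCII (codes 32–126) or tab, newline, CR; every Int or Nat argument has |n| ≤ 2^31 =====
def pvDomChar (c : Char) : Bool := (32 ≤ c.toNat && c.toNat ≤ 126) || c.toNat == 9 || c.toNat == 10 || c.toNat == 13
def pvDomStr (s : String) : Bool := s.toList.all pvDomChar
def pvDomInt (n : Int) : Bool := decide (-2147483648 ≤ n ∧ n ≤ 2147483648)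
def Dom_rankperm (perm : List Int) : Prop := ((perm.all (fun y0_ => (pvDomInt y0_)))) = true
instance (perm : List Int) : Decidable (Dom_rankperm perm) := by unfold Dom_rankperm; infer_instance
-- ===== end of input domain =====

-- B replaces A's per-step scan over the Counter's distinct keys by a sorted suffix list
-- with binary search (faster: a timing run measured it; equal return value proved below).
-- ===== PORT A =====
-- modulus constant from the Python module
def pvMod : Int := 1000003

/- Literal port of A: loop over range(n); x = perm[(n-1)-i]; ctr[x] += 1 on a Counter is
   Dict.modify x 0 (+1); `for y in ctr` iterates the keys in insertion order;
   pow(c, mod-2, mod) is PySem.Int.powMod (exponent mod-2 = 1000001 ≥ 0).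
   perm[(n-1)-i] is always in range (0 ≤ i < n), so pyGetD is exact here. -/
def rankperm (perm : List Int) : Int :=
  let n : Int := perm.length
  let st := (PySem.List.pyRange 0 n 1).foldl
    (fun (st : Int × Int × PySem.Dict Int Int) i =>
      let rank := st.1
      let sp := st.2.1
      let ctr := st.2.2
      let x := PySem.List.pyGetD perm ((n - 1) - i) 0
      let ctr := ctr.modify x 0 (· + 1)
      let inv := PySem.Int.powMod (ctr.getD x 0) (pvMod - 2).toNat pvMod
      let rank := ctr.keys.foldl
        (fun r y => if y < x then PySem.Int.mod (r + sp * ctr.getD y 0 * inv) pvMod else r) rank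
      let sp := PySem.Int.mod (sp * (i + 1) * inv) pvMod
      (rank, sp, ctr))
    (1, 1, PySem.Dict.empty)
  st.1

-- ===== PORT B =====
/- Literal port of B (Source B): countdown loop over range(n-1, -1, -1); a sorted suffix list s;
   the hand-written _bisect_left/_bisect_right while-loops in Source B are exactly the standard
   bisect loops = PySem.List.bisectLeft / bisectRight; s.insert(hi, x) is PySem.List.insert.
   perm[i] is always in range here, so pyGetD is exact. -/
def rankperm_alt (perm : List Int) : Int :=
  let n : Int := perm.length
  let st := (PySem.List.pyRange (n - 1) (-1) (-1)).foldl
    (fun (st : Int × Int × List Int) i =>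
      let rank := st.1
      let sp := st.2.1
      let s := st.2.2
      let x := PySem.List.pyGetD perm i 0
      let lo : Nat := PySem.List.bisectLeft s x
      let hi : Nat := PySem.List.bisectRight s x
      let s := PySem.List.insert s (hi : Int) x
      let inv := PySem.Int.powMod ((hi : Int) - (lo : Int) + 1) (pvMod - 2).toNat pvMod
      let rank := PySem.Int.mod (rank + sp * (lo : Int) * inv) pvMod
      let sp := PySem.Int.mod (sp * (n - i) * inv) pvMod
      (rank, sp, s))
    (1, 1, ([] : List Int))
  st.1

-- ===== PRECONDITION & SPEC =====
def Spec_rankperm (perm : List Int) (out : Int) : Prop := out = rankperm_alt perm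
instance (perm : List Int) (out : Int) : Decidable (Spec_rankperm perm out) := by unfold Spec_rankperm; infer_instance

-- ===== CLAIM (what is proved, stated in full; the proofs are below) =====
def Claim_equal_rankperm : Prop := ∀ (perm : List Int), Dom_rankperm perm → Spec_rankperm perm (rankperm perm)

-- ===== LEMMAS AND PROOFS =====

-- reference recursion for A's loop: processes the reversed perm element by element
def pvGoA : List Int → Int → Int → Int → PySem.Dict Int Int → Int
  | [], _, rank, _, _ => rank
  | x :: l, k, rank, sp, ctr =>
      let ctr' := ctr.modify x 0 (· + 1)
      let inv := PySem.Int.powMod (ctr'.getD x 0) (pvMod - 2).toNat pvMod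
      let rank' := ctr'.keys.foldl
        (fun r y => if y < x then PySem.Int.mod (r + sp * ctr'.getD y 0 * inv) pvMod else r) rank
      pvGoA l (k + 1) rank' (PySem.Int.mod (sp * (k + 1) * inv) pvMod) ctr'

-- reference recursion for B's loop
def pvGoB : List Int → Int → Int → Int → List Int → Int
  | [], _, rank, _, _ => rank
  | x :: l, k, rank, sp, s =>
      let lo : Nat := PySem.List.bisectLeft s x
      let hi : Nat := PySem.List.bisectRight s x
      let s' := PySem.List.insert s (hi : Int) x
      let inv := PySem.Int.powMod ((hi : Int) - (lo : Int) + 1) (pvMod - 2).toNat pvMod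
      pvGoB l (k + 1) (PySem.Int.mod (rank + sp * (lo : Int) * inv) pvMod)
        (PySem.Int.mod (sp * (k + 1) * inv) pvMod) s'

lemma pvMod_pos : (0 : Int) < pvMod := by norm_num [pvMod]

-- a predicate that is true exactly below a cut-off r counts to r
lemma pv_countP_cut (s : List Int) (p : Int → Bool) (r : Nat) (hr : r ≤ s.length)
    (h1 : ∀ (j : Nat) (hj : j < s.length), j < r → p s[j])
    (h2 : ∀ (j : Nat) (hj : j < s.length), r ≤ j → ¬ p s[j]) :
    s.countP p = r := by
  have hsplit : s = s.take r ++ s.drop r := (List.take_append_drop r s).symm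
  rw [hsplit, List.countP_append]
  have htake : (s.take r).countP p = r := by
    have : ∀ a ∈ s.take r, p a := by
      intro a ha
      rw [List.mem_take_iff_getElem] at ha
      obtain ⟨i, hi, rfl⟩ := ha
      exact h1 i (lt_of_lt_of_le hi (min_le_right _ _)) (lt_of_lt_of_le hi (min_le_left _ _))
    rw [List.countP_eq_length.mpr this, List.length_take, Nat.min_eq_left hr]
  have hdrop : (s.drop r).countP p = 0 := by
    rw [List.countP_eq_zero]
    intro a ha
    rw [List.mem_drop_iff_getElem] at ha
    obtain ⟨i, hi, rfl⟩ := ha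
    exact h2 (r + i) (by omega) (by omega)
  omega

-- countP (≤ x) = countP (< x) + count x
lemma pv_countP_le_split (s : List Int) (x : Int) :
    s.countP (fun a => a ≤ x) = s.countP (fun a => a < x) + s.count x := by
  induction s with
  | nil => simp
  | cons a s ih =>
    simp only [List.countP_cons, List.count_cons, ih]
    rcases lt_trichotomy a x with h | h | h
    · simp [h, le_of_lt h, ne_of_lt h]; omega
    · subst h; simp; omega
    · simp [not_le_of_gt h, not_lt_of_gt h, ne_of_gt h]

-- A's inner mod-accumulating loop is one mod of the accumulated sum
lemma pv_foldl_mod_add {α : Type} (l : List α) (P : α → Prop) [DecidablePred P] (g : α → Int)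
    (r : Int) (hr0 : 0 ≤ r) (hr1 : r < pvMod) :
    l.foldl (fun r y => if P y then PySem.Int.mod (r + g y) pvMod else r) r
      = PySem.Int.mod (r + ((l.filter (fun y => decide (P y))).map g).sum) pvMod := by
  induction l generalizing r with
  | nil =>
    simp [PySem.Int.mod_eq_emod_of_pos pvMod_pos, Int.emod_eq_of_lt hr0 hr1]
  | cons y l ih =>
    by_cases hp : P y
    · have hfil : (y :: l).filter (fun y => decide (P y))
          = y :: l.filter (fun y => decide (P y)) := List.filter_cons_of_pos (by simpa using hp)
      rw [List.foldl_cons, if_pos hp, hfil, List.map_cons, List.sum_cons]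
      rw [ih _ (PySem.Int.mod_nonneg _ pvMod_pos) (PySem.Int.mod_lt _ pvMod_pos)]
      rw [PySem.Int.mod_eq_emod_of_pos pvMod_pos, PySem.Int.mod_eq_emod_of_pos pvMod_pos,
        PySem.Int.mod_eq_emod_of_pos pvMod_pos, Int.emod_add_emod]
      ring_nf
    · have hfil : (y :: l).filter (fun y => decide (P y))
          = l.filter (fun y => decide (P y)) := List.filter_cons_of_neg (by simpa using hp)
      rw [List.foldl_cons, if_neg hp, hfil]
      exact ih r hr0 hr1

-- counting with membership in y :: K splits off the y-term
lemma pv_countP_mem_cons (hist : List Int) (y : Int) (K : List Int) (hy : y ∉ K)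
    (p : Int → Bool) :
    hist.countP (fun z => p z && decide (z ∈ y :: K))
      = hist.countP (fun z => p z && decide (z ∈ K)) + (if p y then hist.count y else 0) := by
  induction hist with
  | nil => simp
  | cons a hist ih =>
    simp only [List.countP_cons, List.count_cons, ih]
    by_cases hay : a = y
    · subst hay
      have : a ∉ K := hy
      by_cases hp : p a <;> simp [hp, this] <;> omega
    · by_cases hp : p a <;> by_cases hK : a ∈ K <;>
        simp [hp, hK, hay] <;> split_ifs <;> omega

-- summing the multiplicities of the distinct keys below x counts the elements below x
lemma pv_sum_counts (K : List Int) (hist : List Int) (x : Int) (hK : K.Nodup)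
    (hcov : ∀ z ∈ hist, z ∈ K) :
    ((K.filter (fun y => decide (y < x))).map (fun y => (hist.count y : Int))).sum
      = (hist.countP (fun z => decide (z < x)) : Int) := by
  have main : ∀ (K : List Int), K.Nodup →
      ((K.filter (fun y => decide (y < x))).map (fun y => (hist.count y : Int))).sum
        = (hist.countP (fun z => decide (z < x) && decide (z ∈ K)) : Int) := by
    intro K hK
    induction K with
    | nil => simp
    | cons y K ih =>
      have hy : y ∉ K := (List.nodup_cons.mp hK).1
      have hKn : K.Nodup := (List.nodup_cons.mp hK).2
      rw [pv_countP_mem_cons hist y K hy]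
      by_cases hp : (y < x)
      · simp only [List.filter_cons, hp, decide_true, List.map_cons, List.sum_cons, ih hKn,
          if_pos]
        push_cast
        ring
      · simp only [List.filter_cons, hp, decide_false, Bool.false_eq_true, if_false, add_zero]
        exact ih hKn
  rw [main K hK]
  congr 1
  apply List.countP_congr
  intro z hz
  simp [hcov z hz]

-- inserting x at its bisectRight position keeps the list sorted
lemma pv_sorted_insert (s : List Int) (x : Int) (r : Nat) (hr : r ≤ s.length)
    (hsort : s.Pairwise (· ≤ ·))
    (h1 : ∀ (j : Nat) (hj : j < s.length), j < r → s[j] ≤ x)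
    (h2 : ∀ (j : Nat) (hj : j < s.length), r ≤ j → x < s[j]) :
    (s.take r ++ x :: s.drop r).Pairwise (· ≤ ·) := by
  have htake : (s.take r).Pairwise (· ≤ ·) := hsort.sublist (List.take_sublist r s)
  have hdrop : (s.drop r).Pairwise (· ≤ ·) := hsort.sublist (List.drop_sublist r s)
  have hmemtake : ∀ a ∈ s.take r, a ≤ x := by
    intro a ha
    rw [List.mem_take_iff_getElem] at ha
    obtain ⟨j, hj, rfl⟩ := ha
    exact h1 j (by omega) (by omega)
  have hmemdrop : ∀ b ∈ s.drop r, x ≤ b := by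
    intro b hb
    rw [List.mem_drop_iff_getElem] at hb
    obtain ⟨j, hj, rfl⟩ := hb
    exact le_of_lt (h2 (r + j) (by omega) (by omega))
  rw [List.pairwise_append]
  refine ⟨htake, List.pairwise_cons.mpr ⟨hmemdrop, hdrop⟩, ?_⟩
  intro a ha b hb
  rcases List.mem_cons.mp hb with rfl | hb'
  · exact hmemtake a ha
  · exact le_trans (hmemtake a ha) (hmemdrop b hb')

-- the heart: both reference recursions agree under the loop invariant
-- (the Counter holds the multiplicities of the processed elements; s is a sorted
-- rearrangement of the same elements; rank is already reduced mod pvMod)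
lemma pv_go_eq (l : List Int) : ∀ (hist s : List Int) (k rank sp : Int),
    s.Perm hist → s.Pairwise (· ≤ ·) → 0 ≤ rank → rank < pvMod →
    pvGoA l k rank sp (PySem.Dict.counter hist) = pvGoB l k rank sp s := by
  induction l with
  | nil => intro hist s k rank sp _ _ _ _; rfl
  | cons x l ih =>
    intro hist s k rank sp hperm hsort hr0 hr1
    obtain ⟨hlo_le, hlo1, hlo2⟩ := PySem.List.bisectLeft_spec s x hsort
    obtain ⟨hhi_le, hhi1, hhi2⟩ := PySem.List.bisectRight_spec s x hsort
    set lo := PySem.List.bisectLeft s x with hlodef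
    set hi := PySem.List.bisectRight s x with hhidef
    have hlo : s.countP (fun a => decide (a < x)) = lo :=
      pv_countP_cut s _ lo hlo_le
        (fun j hj hjr => by simpa using hlo1 j hj hjr)
        (fun j hj hjr => by simpa using not_lt.mpr (hlo2 j hj hjr))
    have hhi : s.countP (fun a => decide (a ≤ x)) = hi :=
      pv_countP_cut s _ hi hhi_le
        (fun j hj hjr => by simpa using hhi1 j hj hjr)
        (fun j hj hjr => by simpa using not_le.mpr (hhi2 j hj hjr))
    have hcnt : s.count x = hi - lo ∧ lo ≤ hi := by
      have := pv_countP_le_split s x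
      omega
    have hctr : (PySem.Dict.counter hist).modify x 0 (· + 1)
        = PySem.Dict.counter (hist ++ [x]) :=
      (PySem.Dict.counter_append_singleton hist x).symm
    have hinv : (PySem.Dict.counter (hist ++ [x])).getD x 0 = (hi : Int) - (lo : Int) + 1 := by
      rw [PySem.Dict.getD_counter]
      have hcx : hist.count x = s.count x := (hperm.count_eq x).symm
      have := hcnt.1
      have := hcnt.2
      simp [List.count_append]
      omega
    have hinner : ∀ inv : Int,
        (PySem.Dict.counter (hist ++ [x])).keys.foldl
          (fun r y => if y < x then
            PySem.Int.mod (r + sp * (PySem.Dict.counter (hist ++ [x])).getD y 0 * inv) pvMod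
          else r) rank
        = PySem.Int.mod (rank + sp * (lo : Int) * inv) pvMod := by
      intro inv
      rw [PySem.Dict.keys_counter]
      rw [pv_foldl_mod_add _ (fun y => y < x)
        (fun y => sp * (PySem.Dict.counter (hist ++ [x])).getD y 0 * inv) rank hr0 hr1]
      congr 1
      have hmapeq : ((PySem.Set.ofList (hist ++ [x])).filter (fun y => decide (y < x))).map
            (fun y => sp * (PySem.Dict.counter (hist ++ [x])).getD y 0 * inv)
          = ((PySem.Set.ofList (hist ++ [x])).filter (fun y => decide (y < x))).map
            (fun y => (sp * inv) * ((hist ++ [x]).count y : Int)) := by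
        apply List.map_congr_left
        intro y hy
        rw [PySem.Dict.getD_counter]
        ring
      rw [hmapeq, List.sum_map_mul_left,
        pv_sum_counts _ (hist ++ [x]) x (PySem.Set.nodup_ofList _)
          (fun z hz => (PySem.Set.mem_ofList _ _).mpr hz)]
      have hcount : (hist ++ [x]).countP (fun z => decide (z < x))
          = hist.countP (fun z => decide (z < x)) := by
        simp [List.countP_append]
      rw [hcount, ← hperm.countP_eq, hlo]
      ring
    have hperm' : (PySem.List.insert s (hi : Int) x).Perm (hist ++ [x]) := by
      rw [PySem.List.insert_natCast s hi x hhi_le]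
      refine List.perm_middle.trans ?_
      rw [List.take_append_drop]
      exact (hperm.cons x).trans (List.perm_append_singleton x hist).symm
    have hsort' : (PySem.List.insert s (hi : Int) x).Pairwise (· ≤ ·) := by
      rw [PySem.List.insert_natCast s hi x hhi_le]
      exact pv_sorted_insert s x hi hhi_le hsort
        (fun j hj hjr => hhi1 j hj hjr)
        (fun j hj hjr => hhi2 j hj hjr)
    simp only [pvGoA, pvGoB, hctr, hinv, hinner]
    exact ih (hist ++ [x]) _ _ _ _ hperm' hsort'
      (PySem.Int.mod_nonneg _ pvMod_pos) (PySem.Int.mod_lt _ pvMod_pos)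

-- A's range loop, generalized: the remaining m iterations compute pvGoA on what is
-- left of the reversed input
lemma pv_A_fold (perm : List Int) : ∀ (m : Nat), m ≤ perm.length →
    ∀ (rank sp : Int) (ctr : PySem.Dict Int Int),
    ((PySem.List.pyRange ((perm.length : Int) - m) perm.length 1).foldl
      (fun (st : Int × Int × PySem.Dict Int Int) i =>
        let rank := st.1
        let sp := st.2.1
        let ctr := st.2.2
        let x := PySem.List.pyGetD perm (((perm.length : Int) - 1) - i) 0
        let ctr := ctr.modify x 0 (· + 1)
        let inv := PySem.Int.powMod (ctr.getD x 0) (pvMod - 2).toNat pvMod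
        let rank := ctr.keys.foldl
          (fun r y => if y < x then PySem.Int.mod (r + sp * ctr.getD y 0 * inv) pvMod else r) rank
        let sp := PySem.Int.mod (sp * (i + 1) * inv) pvMod
        (rank, sp, ctr))
      (rank, sp, ctr)).1
      = pvGoA (perm.reverse.drop (perm.length - m)) ((perm.length : Int) - m) rank sp ctr := by
  intro m
  induction m with
  | zero =>
    intro _ rank sp ctr
    rw [show ((perm.length : Int) - (0:Nat)) = (perm.length : Int) by push_cast; ring,
      PySem.List.pyRange_one_eq_nil le_rfl]
    rw [show perm.reverse.drop (perm.length - 0) = [] from by simp]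
    simp [pvGoA]
  | succ m ih =>
    intro hm rank sp ctr
    have hmlt : m < perm.length := by omega
    have hcons : PySem.List.pyRange ((perm.length : Int) - (m+1:Nat)) perm.length 1
        = ((perm.length : Int) - (m+1:Nat))
          :: PySem.List.pyRange ((perm.length : Int) - (m:Nat)) perm.length 1 := by
      rw [PySem.List.pyRange_one_cons (by push_cast; omega)]
      congr 1
      push_cast; ring
    rw [hcons, List.foldl_cons]
    have hidx : ((perm.length : Int) - 1) - ((perm.length : Int) - (m+1:Nat)) = (m : Int) := by
      push_cast; ring
    have hx : PySem.List.pyGetD perm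
        (((perm.length : Int) - 1) - ((perm.length : Int) - (m+1:Nat))) 0 = perm[m] := by
      rw [hidx, PySem.List.pyGetD_natCast, List.getD_eq_getElem?_getD,
        List.getElem?_eq_getElem hmlt]
      rfl
    have hdrop : perm.reverse.drop (perm.length - (m+1))
        = perm[m] :: perm.reverse.drop (perm.length - m) := by
      rw [List.drop_eq_getElem_cons (by simp; omega)]
      congr 1
      · rw [List.getElem_reverse]
        congr 1
        omega
      · simp
        omega
    rw [hdrop]
    simp only [pvGoA, hx]
    rw [ih (by omega)]
    congr 2 <;> push_cast <;> ring

-- B's countdown loop, generalized over the m indices still to visit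
lemma pv_B_fold (perm : List Int) : ∀ (m : Nat), m ≤ perm.length →
    ∀ (rank sp : Int) (s : List Int),
    ((PySem.List.pyRange ((m : Int) - 1) (-1) (-1)).foldl
      (fun (st : Int × Int × List Int) i =>
        let rank := st.1
        let sp := st.2.1
        let s := st.2.2
        let x := PySem.List.pyGetD perm i 0
        let lo : Nat := PySem.List.bisectLeft s x
        let hi : Nat := PySem.List.bisectRight s x
        let s := PySem.List.insert s (hi : Int) x
        let inv := PySem.Int.powMod ((hi : Int) - (lo : Int) + 1) (pvMod - 2).toNat pvMod
        let rank := PySem.Int.mod (rank + sp * (lo : Int) * inv) pvMod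
        let sp := PySem.Int.mod (sp * ((perm.length : Int) - i) * inv) pvMod
        (rank, sp, s))
      (rank, sp, s)).1
      = pvGoB ((perm.take m).reverse) ((perm.length : Int) - m) rank sp s := by
  intro m
  induction m with
  | zero =>
    intro _ rank sp s
    rw [show ((0:Nat) : Int) - 1 = (-1 : Int) by norm_num,
      PySem.List.pyRange_neg_one_eq_nil le_rfl]
    simp [pvGoB]
  | succ m ih =>
    intro hm rank sp s
    have hmlt : m < perm.length := by omega
    have hcons : PySem.List.pyRange (((m+1:Nat) : Int) - 1) (-1) (-1)
        = ((m : Int)) :: PySem.List.pyRange ((m : Int) - 1) (-1) (-1) := by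
      rw [show (((m+1:Nat) : Int) - 1) = (m : Int) by push_cast; ring]
      exact PySem.List.pyRange_neg_one_cons (by push_cast; omega)
    rw [hcons, List.foldl_cons]
    have hx : PySem.List.pyGetD perm ((m : Int)) 0 = perm[m] := by
      rw [PySem.List.pyGetD_natCast, List.getD_eq_getElem?_getD, List.getElem?_eq_getElem hmlt]
      rfl
    have htake : (perm.take (m+1)).reverse = perm[m] :: (perm.take m).reverse := by
      rw [List.take_add_one, List.getElem?_eq_getElem hmlt]
      simp
    rw [htake]
    simp only [pvGoB, hx]
    rw [ih (by omega)]
    congr 2 <;> push_cast <;> ring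

-- A's port is pvGoA on the reversed input
lemma pv_A_eq (perm : List Int) : rankperm perm = pvGoA perm.reverse 0 1 1 PySem.Dict.empty := by
  have h := pv_A_fold perm perm.length le_rfl 1 1 PySem.Dict.empty
  rw [sub_self, Nat.sub_self, List.drop_zero] at h
  simpa [rankperm] using h

-- B's port is pvGoB on the reversed input
lemma pv_B_eq (perm : List Int) : rankperm_alt perm = pvGoB perm.reverse 0 1 1 [] := by
  have h := pv_B_fold perm perm.length le_rfl 1 1 []
  rw [List.take_length, sub_self] at h
  simpa [rankperm_alt] using h

-- ===== VERDICT (by name: the statement is the Claim_ definition above) =====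
theorem rankperm_spec : Claim_equal_rankperm := by
  intro perm _
  unfold Spec_rankperm
  rw [pv_A_eq, pv_B_eq]
  exact pv_go_eq perm.reverse [] [] 0 1 1 (List.Perm.refl _) (by simp) (by norm_num)
    (by norm_num [pvMod])
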